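-- pv_equiv track=rewrite | github.com/cragson/CSGO-IDA-Signature-Converter | SignatureConverter.py | generateByteSignature
-- ===== SOURCE A (Python) =====
-- def convertSig( sig ):
--
--     SigArray = []
--
--     for char in range( 0, len( sig ), 1 ):
--
--         if( sig[ char ] == ' ' ):
--             continue
--
--         SigArray.append( sig[ char ] )
--
--     return SigArray
--
-- def generateByteSignature( sig ):
--
--     Signature = convertSig( sig )
--
--     ByteSignature = []
--
--     counter = 1
--
--     for element in range( 0, len( Signature ), 1 ):
--
--         if( counter >= 2 ):
--
--             ByteSignature.append( r'\x' + str( Signature[ element - 1 ] ) + str( Signature[ element ] ) )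
--
--             counter = 1
--
--             continue
--
--         if( Signature[ element ] != '?' ):
--
--             counter += 1
--
--             continue
--
--         if( Signature[ element ] == '?'):
--
--             ByteSignature.append( r'\x00' )
--
--             counter = 1
--
--
--     return ''.join( ByteSignature )
-- ===== SOURCE B (Python) =====
-- def generateByteSignature(sig):
--     s = [c for c in sig if c != ' ']
--     n = len(s)
--     out = []
--     i = 0
--     while i < n:
--         if s[i] == '?':
--             out.append(r'\x00')
--             i += 1
--         elif i + 1 < n:
--             out.append(r'\x' + s[i] + s[i + 1])
--             i += 2
--         else:
--             # lone trailing non-'?' char has no partner: dropped, as in the original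
--             i += 1
--     return ''.join(out)
-- ===== Notes on version B (the rewrite author's own statement) =====
-- stated objective: simpler
-- what changed: Replaced A's per-character counter state machine (which pairs via a backward index element-1) by an index-driven while loop that consumes a variable stride: 1 for '?', 2 for a hex pair; space stripping becomes a comprehension.
import Mathlib
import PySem

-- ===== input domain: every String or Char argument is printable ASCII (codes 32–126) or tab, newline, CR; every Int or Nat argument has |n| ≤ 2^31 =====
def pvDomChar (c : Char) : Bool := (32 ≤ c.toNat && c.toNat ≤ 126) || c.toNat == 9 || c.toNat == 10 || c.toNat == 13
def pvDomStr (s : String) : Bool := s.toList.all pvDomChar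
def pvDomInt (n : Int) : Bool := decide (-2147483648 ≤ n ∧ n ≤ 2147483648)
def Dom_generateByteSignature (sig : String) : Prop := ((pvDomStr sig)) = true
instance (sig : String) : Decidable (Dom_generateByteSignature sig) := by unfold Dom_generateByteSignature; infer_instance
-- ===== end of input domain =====

-- B replaces A's per-char counter state machine by a while loop with a variable stride (simpler decomposition; same O(n) cost).

-- ===== PORT A =====
-- A iterates range(0,len(sig),1) reading sig[char]; that index loop is ported as a fold over the characters in order.
def convertSig (sig : String) : List Char :=
  sig.toList.foldl (fun SigArray c => if c = ' ' then SigArray else SigArray ++ [c]) []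

-- the for-loop over range(0, len(Signature), 1); indices are always in range at runtime
-- (counter ≥ 2 only occurs with element ≥ 1), so List.getD with a default is exact here.
def generateByteSignatureLoop (Signature : List Char) (element : Nat)
    (ByteSignature : List String) (counter : Int) : List String :=
  if element < Signature.length then
    if counter ≥ 2 then
      generateByteSignatureLoop Signature (element + 1)
        (ByteSignature ++ ["\\x" ++ String.mk [Signature.getD (element - 1) ' ']
                                 ++ String.mk [Signature.getD element ' ']]) 1
    else if Signature.getD element ' ' ≠ '?' then
      generateByteSignatureLoop Signature (element + 1) ByteSignature (counter + 1)
    else if Signature.getD element ' ' = '?' then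
      generateByteSignatureLoop Signature (element + 1) (ByteSignature ++ ["\\x00"]) 1
    else
      generateByteSignatureLoop Signature (element + 1) ByteSignature counter
  else ByteSignature
termination_by Signature.length - element

def generateByteSignature (sig : String) : String :=
  String.join (generateByteSignatureLoop (convertSig sig) 0 [] 1)

-- ===== PORT B =====
-- the list comprehension [c for c in sig if c != ' ']
def altStrip (sig : String) : List Char :=
  sig.toList.filter (fun c => c ≠ ' ')

-- the while loop over index i, consuming 1 char for '?' and 2 otherwise (a lone
-- trailing non-'?' char has no partner and produces nothing), as structural recursion.
def altLoop : List Char → List String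
  | [] => []
  | c :: rest =>
    if c = '?' then "\\x00" :: altLoop rest
    else
      match rest with
      | [] => []
      | d :: rest2 => ("\\x" ++ String.mk [c] ++ String.mk [d]) :: altLoop rest2

def generateByteSignature_alt (sig : String) : String :=
  String.join (altLoop (altStrip sig))

-- ===== PRECONDITION & SPEC =====
def Spec_generateByteSignature (sig : String) (out : String) : Prop := out = generateByteSignature_alt sig
instance (sig : String) (out : String) : Decidable (Spec_generateByteSignature sig out) := by unfold Spec_generateByteSignature; infer_instance

-- ===== CLAIM (what is proved, stated in full; the proofs are below) =====
def Claim_equal_generateByteSignature : Prop := ∀ (sig : String), Dom_generateByteSignature sig → Spec_generateByteSignature sig (generateByteSignature sig)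

-- ===== LEMMAS AND PROOFS =====

lemma convertSig_foldl (l : List Char) (acc : List Char) :
    l.foldl (fun SigArray c => if c = ' ' then SigArray else SigArray ++ [c]) acc
      = acc ++ l.filter (fun c => c ≠ ' ') := by
  induction l generalizing acc with
  | nil => simp
  | cons c rest ih =>
    simp only [List.foldl_cons, List.filter_cons]
    by_cases h : c = ' '
    · simp [h, ih]
    · simp [h, ih]

lemma convertSig_eq (sig : String) : convertSig sig = altStrip sig := by
  simp [convertSig, altStrip, convertSig_foldl]

lemma altLoop_nil : altLoop [] = [] := by
  rw [altLoop.eq_def]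

lemma altLoop_q (rest : List Char) : altLoop ('?' :: rest) = "\\x00" :: altLoop rest := by
  rw [altLoop.eq_def]; simp

lemma altLoop_pair (c d : Char) (rest2 : List Char) (h : ¬ c = '?') :
    altLoop (c :: d :: rest2) = ("\\x" ++ String.mk [c] ++ String.mk [d]) :: altLoop rest2 := by
  rw [altLoop.eq_def]; simp [h]

lemma altLoop_single (c : Char) (h : ¬ c = '?') : altLoop [c] = [] := by
  rw [altLoop.eq_def]; simp [h]

-- the joint invariant of A's loop: with counter = 1 it produces exactly B's output on
-- the remaining suffix; with counter = 2 it first pairs l[i-1] with l[i] (if any).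
lemma loop_key (l : List Char) : ∀ (k i : Nat) (acc : List String), l.length - i ≤ k →
    (generateByteSignatureLoop l i acc 1 = acc ++ altLoop (l.drop i)) ∧
    (generateByteSignatureLoop l i acc 2 =
      acc ++ (match l.drop i with
              | [] => []
              | d :: _ => ["\\x" ++ String.mk [l.getD (i - 1) ' '] ++ String.mk [d]])
          ++ altLoop (l.drop (i + 1))) := by
  intro k
  induction k with
  | zero =>
    intro i acc hk
    have hi : l.length ≤ i := by omega
    rw [List.drop_eq_nil_of_le hi, List.drop_eq_nil_of_le (by omega)]
    constructor <;>
      · rw [generateByteSignatureLoop]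
        simp [Nat.not_lt_of_le hi, altLoop_nil]
  | succ k ih =>
    intro i acc hk
    by_cases hi : i < l.length
    · have hk' : l.length - (i + 1) ≤ k := by omega
      have hdrop : l.drop i = l[i] :: l.drop (i + 1) := List.drop_eq_getElem_cons hi
      have hget : l[i]? = some l[i] := List.getElem?_eq_getElem hi
      constructor
      · rw [generateByteSignatureLoop, if_pos hi, if_neg (by norm_num : ¬ (1:Int) ≥ 2)]
        by_cases hq : l[i] = '?'
        · rw [if_neg (by simp [List.getD, hget, hq]), if_pos (by simp [List.getD, hget, hq])]
          rw [(ih (i + 1) _ hk').1, hdrop, hq, altLoop_q]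
          simp
        · rw [if_pos (by simp [List.getD, hget, hq])]
          have h2 : (1:Int) + 1 = 2 := by norm_num
          rw [h2, (ih (i + 1) _ hk').2]
          have hg1 : l.getD ((i + 1) - 1) ' ' = l[i] := by simp [List.getD, hget]
          rw [hg1, hdrop]
          cases h3 : l.drop (i + 1) with
          | nil =>
            have h4 : l.drop (i + 1 + 1) = [] := by rw [← List.tail_drop, h3]; rfl
            simp [altLoop_single _ hq, h4, altLoop_nil]
          | cons d rest2 =>
            have h4 : l.drop (i + 1 + 1) = rest2 := by
              rw [← List.tail_drop, h3]; rfl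
            simp [altLoop_pair _ _ _ hq, h4]
      · rw [generateByteSignatureLoop, if_pos hi, if_pos (by norm_num : (2:Int) ≥ 2)]
        rw [(ih (i + 1) _ hk').1, hdrop]
        simp [List.getD, hget]
    · have hle : l.length ≤ i := by omega
      rw [List.drop_eq_nil_of_le hle, List.drop_eq_nil_of_le (by omega)]
      constructor <;>
        · rw [generateByteSignatureLoop]
          simp [Nat.not_lt_of_le hle, altLoop_nil]

-- ===== VERDICT (by name: the statement is the Claim_ definition above) =====
theorem generateByteSignature_spec : Claim_equal_generateByteSignature := by
  intro sig _
  unfold Spec_generateByteSignature generateByteSignature generateByteSignature_alt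
  rw [convertSig_eq]
  rw [(loop_key (altStrip sig) (altStrip sig).length 0 [] (by omega)).1]
  simp
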